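-- pv_equiv track=rewrite | github.com/dhananjayece244/Artificial-Intelligence-CS-621- | assignment-2/1/part2.py | makeS
-- ===== SOURCE A (Python) =====
-- def makeS(c):
-- 	s_num = ""
-- 	for i in range(2*c):
-- 		if(i%2==0):
-- 			s_num += 's'
-- 		else:
-- 			s_num += '('
-- 	s_num += '0'
-- 	for i in range(c):
-- 		s_num += ')'
-- 	return s_num
-- ===== SOURCE B (Python) =====
-- def makeS(c):
--     return 's(' * c + '0' + ')' * c
-- ===== Notes on version B (the rewrite author's own statement) =====
-- stated objective: simpler
-- what changed: Replaces the two character-appending loops (with a parity branch in the first) by a single closed-form expression using string repetition.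
import Mathlib
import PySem

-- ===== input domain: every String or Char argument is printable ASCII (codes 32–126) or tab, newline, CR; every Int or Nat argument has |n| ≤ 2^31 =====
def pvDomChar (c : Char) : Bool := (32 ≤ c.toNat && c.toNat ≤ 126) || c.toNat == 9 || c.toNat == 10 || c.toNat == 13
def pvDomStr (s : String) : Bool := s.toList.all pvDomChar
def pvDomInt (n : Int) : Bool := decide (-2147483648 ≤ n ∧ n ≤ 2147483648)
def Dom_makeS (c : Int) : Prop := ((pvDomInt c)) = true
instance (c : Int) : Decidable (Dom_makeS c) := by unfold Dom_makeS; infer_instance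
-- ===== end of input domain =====

-- B replaces A's two appending loops (parity branch in the first) by one closed-form
-- 's(' * c + '0' + ')' * c expression; objective: simpler.

-- ===== PORT A =====
-- strings are carried as List Char (PySem.Chars level) and packed with String.mk at the end
def makeS (c : Int) : String :=
  let s1 : List Char :=
    (PySem.List.pyRange 0 (2 * c) 1).foldl
      (fun acc i => acc ++ [if PySem.Int.mod i 2 == 0 then 's' else '(']) []
  let s2 := s1 ++ ['0']
  let s3 := (PySem.List.pyRange 0 c 1).foldl (fun acc _ => acc ++ [')']) s2
  String.mk s3

-- ===== PORT B =====
-- 's(' * c  →  flatten of c copies of ['s','('];  ')' * c  →  replicate c ')'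
def makeS_alt (c : Int) : String :=
  String.mk ((List.replicate c.toNat ['s', '(']).flatten ++ ['0'] ++ List.replicate c.toNat ')')

-- ===== PRECONDITION & SPEC =====
def Spec_makeS (c : Int) (out : String) : Prop := out = makeS_alt c
instance (c : Int) (out : String) : Decidable (Spec_makeS c out) := by unfold Spec_makeS; infer_instance

-- ===== CLAIM (what is proved, stated in full; the proofs are below) =====
def Claim_equal_makeS : Prop := ∀ (c : Int), Dom_makeS c → Spec_makeS c (makeS c)

-- ===== LEMMAS AND PROOFS =====

-- the first loop's characters form c copies of "s("; the second loop's, c copies of ')'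
lemma pvLoop1 (n : Nat) :
    (PySem.List.pyRange 0 (2 * (n : Int)) 1).map
        (fun i => if PySem.Int.mod i 2 == 0 then 's' else '(')
      = (List.replicate n ['s', '(']).flatten := by
  induction n with
  | zero => simp [PySem.List.pyRange_one_eq_nil]
  | succ k ih =>
    have hcast : ((k + 1 : Nat) : Int) = (k : Int) + 1 := by push_cast; ring
    rw [hcast]
    have e1 : PySem.List.pyRange 0 (2 * ((k : Int) + 1)) 1
        = PySem.List.pyRange 0 (2 * k + 1) 1 ++ [2 * (k : Int) + 1] := by
      rw [show (2 : Int) * ((k : Int) + 1) = (2 * k + 1) + 1 by ring,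
        PySem.List.pyRange_one_succ_right (by positivity)]
    have e2 : PySem.List.pyRange 0 (2 * (k : Int) + 1) 1
        = PySem.List.pyRange 0 (2 * k) 1 ++ [2 * (k : Int)] := by
      rw [PySem.List.pyRange_one_succ_right (by positivity)]
    have hm0 : PySem.Int.mod (2 * (k : Int)) 2 = 0 := by
      rw [PySem.Int.mod_eq_emod_of_pos (by norm_num)]; omega
    have hm1 : PySem.Int.mod (2 * (k : Int) + 1) 2 = 1 := by
      rw [PySem.Int.mod_eq_emod_of_pos (by norm_num)]; omega
    rw [e1, e2]
    simp only [List.map_append, List.map_cons, List.map_nil, hm0, hm1]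
    rw [ih]
    simp [List.replicate_succ' (n := k)]

lemma pvLoop2 (n : Nat) : (PySem.List.pyRange 0 (n : Int) 1).map (fun _ => ')')
    = List.replicate n ')' := by
  induction n with
  | zero => simp [PySem.List.pyRange_one_eq_nil]
  | succ k ih =>
    rw [show ((k + 1 : Nat) : Int) = (k : Int) + 1 by push_cast; ring,
      PySem.List.pyRange_one_succ_right (by positivity)]
    simp [List.replicate_succ' (n := k), ih]

-- ===== VERDICT (by name: the statement is the Claim_ definition above) =====
theorem makeS_spec : Claim_equal_makeS := by
  intro c _
  unfold Spec_makeS makeS makeS_alt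
  simp only [PySem.List.foldl_append_singleton_eq_map, List.nil_append]
  by_cases hc : c ≤ 0
  · rw [PySem.List.pyRange_one_eq_nil (by omega), PySem.List.pyRange_one_eq_nil (by omega)]
    simp [Int.toNat_of_nonpos hc]
  · obtain ⟨n, rfl⟩ : ∃ n : Nat, c = (n : Int) :=
      ⟨c.toNat, (Int.toNat_of_nonneg (by omega)).symm⟩
    rw [pvLoop1 n, pvLoop2 n]
    simp
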